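-- pv_equiv track=rewrite | github.com/windowsyl/aoc | 2015/day12.py | omgParsing
-- ===== SOURCE A (Python) =====
-- def omgParsing(x):
--     chunk = [x.pop(0)]
--     while x[0] != '}':
--         if x[0] == '{': chunk.extend(omgParsing(x))
--         else: chunk.append(x.pop(0))
--     else: chunk.append(x.pop(0))
--     if ':"red"' in ''.join(chunk):
--         return []
--     return chunk
-- ===== SOURCE B (Python) =====
-- def omgParsing(x):
--     # Iterative stack machine over the same front-popped token stream:
--     # one list per open chunk; on '}' close the top, drop it if it joins to
--     # contain ':"red"', else merge it into the chunk below (or return it).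
--     stack = [[x.pop(0)]]
--     while True:
--         tok = x.pop(0)
--         if tok == '{':
--             stack.append(['{'])
--         elif tok == '}':
--             top = stack.pop()
--             top.append('}')
--             merged = [] if ':"red"' in ''.join(top) else top
--             if not stack:
--                 return merged
--             stack[-1].extend(merged)
--         else:
--             stack[-1].append(tok)
-- ===== Notes on version B (the rewrite author's own statement) =====
-- stated objective: alternative
-- what changed: Replaces A's recursive-descent parser by an iterative stack machine that keeps one open chunk per stack entry and merges (or drops) a chunk into the one below when its closing brace arrives.
import Mathlib
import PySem

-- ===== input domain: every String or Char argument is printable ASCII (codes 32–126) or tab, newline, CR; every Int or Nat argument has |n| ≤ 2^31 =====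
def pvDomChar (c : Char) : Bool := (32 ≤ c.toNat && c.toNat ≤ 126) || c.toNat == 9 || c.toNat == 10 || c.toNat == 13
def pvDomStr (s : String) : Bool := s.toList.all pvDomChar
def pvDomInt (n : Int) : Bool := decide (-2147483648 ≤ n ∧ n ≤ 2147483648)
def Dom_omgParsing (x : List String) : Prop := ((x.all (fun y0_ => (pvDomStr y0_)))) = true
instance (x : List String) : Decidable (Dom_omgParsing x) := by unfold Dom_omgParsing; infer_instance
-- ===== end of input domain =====

-- B replaces A's recursion by an explicit stack machine over the same token stream
-- (objective: alternative decomposition, same cost). Both A and B consume x destructively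
-- via pop(0) in Python, identically; the equivalence proved here is about the return value.

-- shared by both ports: `[] if ':"red"' in ''.join(chunk) else chunk` (identical line in A and B)
def pvRed (c : List String) : List String :=
  if PySem.Str.isIn ":\"red\"" (PySem.Str.join "" c) = true then [] else c

-- ===== PORT A =====
-- A is a recursive-descent parser mutating x; ported as fuel-indexed mutual recursion
-- returning (chunk, remaining tokens); none = IndexError (x[0]/pop(0) on empty) / fuel out.
mutual
def omgA_parse : Nat → List String → Option (List String × List String)
  | 0, _ => none
  | _ + 1, [] => none
  | f + 1, t0 :: rest =>
    match omgA_loop f [t0] rest with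
    | none => none
    | some (c, r) => some (pvRed c, r)
  termination_by f _ => f

def omgA_loop : Nat → List String → List String → Option (List String × List String)
  | 0, _, _ => none
  | _ + 1, _, [] => none
  | f + 1, chunk, t :: rest =>
    if t = "}" then some (chunk ++ [t], rest)
    else if t = "{" then
      match omgA_parse f (t :: rest) with
      | none => none
      | some (c1, r1) => omgA_loop f (chunk ++ c1) r1
    else omgA_loop f (chunk ++ [t]) rest
  termination_by f _ _ => f
end

def omgParsing (x : List String) : List String :=
  match omgA_parse (2 * x.length + 2) x with
  | some (c, _) => c
  | none => []

-- ===== PORT B =====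
-- B's stack machine: one open chunk per list on the stack (top = head).
def omgB_loop (stack : List (List String)) : List String → Option (List String)
  | [] => none
  | t :: rest =>
    if t = "{" then omgB_loop (["{"] :: stack) rest
    else if t = "}" then
      match stack with
      | [] => none
      | top :: ss =>
        let merged := pvRed (top ++ [t])
        match ss with
        | [] => some merged
        | s :: ss' => omgB_loop ((s ++ merged) :: ss') rest
    else
      match stack with
      | [] => none
      | top :: ss => omgB_loop ((top ++ [t]) :: ss) rest

def omgParsing_alt (x : List String) : List String :=
  match x with
  | [] => []
  | t0 :: rest => (omgB_loop [[t0]] rest).getD []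

-- ===== PRECONDITION & SPEC =====
-- token weight and running brace balance
def pvW (t : String) : Int := if t = "{" then 1 else if t = "}" then -1 else 0
def pvBal : List String → Int
  | [] => 0
  | t :: ts => pvW t + pvBal ts

-- A raises IndexError unless x is nonempty and, after the seed token, the running brace
-- balance of some prefix of the remaining tokens reaches -1 (an unmatched '}' closing the chunk).
def Pre_omgParsing (x : List String) : Prop :=
  x ≠ [] ∧ ∃ n ∈ List.range (x.tail.length + 1), pvBal (x.tail.take n) = -1
instance (x : List String) : Decidable (Pre_omgParsing x) := by unfold Pre_omgParsing; infer_instance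

def pvWitness_omgParsing : List String := ["{", "a", "}"]

def Spec_omgParsing (x : List String) (out : List String) : Prop := out = omgParsing_alt x
instance (x : List String) (out : List String) : Decidable (Spec_omgParsing x out) := by unfold Spec_omgParsing; infer_instance

-- ===== CLAIM (what is proved, stated in full; the proofs are below) =====
def Claim_equal_omgParsing : Prop := ∀ (x : List String), Dom_omgParsing x → Pre_omgParsing x → Spec_omgParsing x (omgParsing x)

-- ===== LEMMAS AND PROOFS =====

theorem pvBal_append (a b : List String) : pvBal (a ++ b) = pvBal a + pvBal b := by
  induction a with
  | nil => simp [pvBal]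
  | cons t ts ih => simp [pvBal, ih]; ring

theorem pvBal_take_append (a b : List String) (n : Nat) :
    pvBal ((a ++ b).take n) = pvBal (a.take n) + pvBal (b.take (n - a.length)) := by
  rw [List.take_append, pvBal_append]

theorem pvW_ge (t : String) : -1 ≤ pvW t := by
  unfold pvW; split_ifs <;> omega

-- consumption/balance soundness of A's loop: it consumes a nonempty prefix w
-- whose balance is -1 and all of whose proper prefixes have balance ≥ 0.
theorem omgA_loop_sound : ∀ (f : Nat) (chunk x c r : List String),
    omgA_loop f chunk x = some (c, r) →
    ∃ w, w ≠ [] ∧ x = w ++ r ∧ pvBal w = -1 ∧ ∀ n < w.length, 0 ≤ pvBal (w.take n) := by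
  intro f
  induction f using Nat.strong_induction_on with
  | _ f ih =>
    intro chunk x c r h
    match f, x with
    | 0, x => simp [omgA_loop] at h
    | f + 1, [] => simp [omgA_loop] at h
    | f + 1, t :: rest =>
      rw [omgA_loop] at h
      by_cases h1 : t = "}"
      · rw [if_pos h1] at h
        simp only [Option.some.injEq, Prod.mk.injEq] at h
        refine ⟨[t], by simp, by rw [← h.2]; rfl, by simp [pvBal, pvW, h1], ?_⟩
        intro n hn
        have : n = 0 := by simpa using hn
        simp [this, pvBal]
      · rw [if_neg h1] at h
        by_cases h2 : t = "{"
        · rw [if_pos h2] at h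
          cases hp : omgA_parse f (t :: rest) with
          | none => rw [hp] at h; simp at h
          | some p =>
            rw [hp] at h
            obtain ⟨c1, r1⟩ := p
            dsimp only at h
            match f, hp with
            | 0, hp => simp [omgA_parse] at hp
            | g + 1, hp =>
              rw [omgA_parse] at hp
              cases hl : omgA_loop g [t] rest with
              | none => rw [hl] at hp; simp at hp
              | some q =>
                rw [hl] at hp
                obtain ⟨c0, r1'⟩ := q
                simp only [Option.some.injEq, Prod.mk.injEq] at hp
                obtain ⟨hc1, hr1⟩ := hp
                subst hr1
                obtain ⟨w0, hw0ne, hrest, hw0bal, hw0pre⟩ := ih g (by omega) _ _ _ _ hl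
                obtain ⟨w2, hw2ne, hr1eq, hw2bal, hw2pre⟩ := ih (g+1) (by omega) _ _ _ _ h
                refine ⟨(t :: w0) ++ w2, by simp, ?_, ?_, ?_⟩
                · simp [hrest, hr1eq]
                · simp [pvBal_append, pvBal, pvW, h2, hw0bal, hw2bal]
                · intro n hn
                  rw [pvBal_take_append]
                  simp only [List.length_cons, List.length_append] at hn
                  rcases Nat.lt_or_ge n (w0.length + 1 + 1) with hle | hgt
                  · have hz : w2.take (n - (t :: w0).length) = [] := by
                      have hz0 : n - (t :: w0).length = 0 := by simp only [List.length_cons]; omega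
                      rw [hz0, List.take_zero]
                    rw [hz]
                    cases n with
                    | zero => simp [pvBal]
                    | succ k =>
                      have htk : (t :: w0).take (k+1) = t :: w0.take k := rfl
                      rw [htk]
                      have hbk : -1 ≤ pvBal (w0.take k) := by
                        rcases Nat.lt_or_ge k w0.length with hk2 | hk2
                        · have := hw0pre k hk2; omega
                        · rw [List.take_of_length_le hk2, hw0bal]
                      simp [pvBal, pvW, h2]
                      omega
                  · have htake : (t :: w0).take n = t :: w0 := by
                      apply List.take_of_length_le; simp; omega
                    rw [htake]
                    have hm : n - (t :: w0).length < w2.length := by simp; omega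
                    have := hw2pre _ hm
                    simp only [pvBal, pvW, if_pos h2, hw0bal]
                    omega
        · rw [if_neg h2] at h
          obtain ⟨w', hw'ne, hrest, hw'bal, hw'pre⟩ := ih f (by omega) _ _ _ _ h
          refine ⟨t :: w', by simp, by simp [hrest], by simp [pvBal, pvW, h1, h2, hw'bal], ?_⟩
          intro n hn
          cases n with
          | zero => simp [pvBal]
          | succ k =>
            have hk : k < w'.length := by simpa using hn
            have := hw'pre k hk
            have htk : (t :: w').take (k+1) = t :: w'.take k := rfl
            rw [htk]
            simp [pvBal, pvW, h1, h2]
            omega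

-- A's loop success is mirrored by B's stack machine.
theorem omgA_loop_alt : ∀ (f : Nat) (chunk x c r : List String),
    omgA_loop f chunk x = some (c, r) →
    ∀ stack, omgB_loop (chunk :: stack) x =
      (match stack with
       | [] => some (pvRed c)
       | s :: ss => omgB_loop ((s ++ pvRed c) :: ss) r) := by
  intro f
  induction f using Nat.strong_induction_on with
  | _ f ih =>
    intro chunk x c r h stack
    match f, x with
    | 0, x => simp [omgA_loop] at h
    | f + 1, [] => simp [omgA_loop] at h
    | f + 1, t :: rest =>
      rw [omgA_loop] at h
      by_cases h1 : t = "}"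
      · rw [if_pos h1] at h
        simp only [Option.some.injEq, Prod.mk.injEq] at h
        obtain ⟨hc, hr⟩ := h
        subst h1; subst hc; subst hr
        cases stack with
        | nil => simp [omgB_loop]
        | cons s ss => simp [omgB_loop]
      · rw [if_neg h1] at h
        by_cases h2 : t = "{"
        · rw [if_pos h2] at h
          cases hp : omgA_parse f (t :: rest) with
          | none => rw [hp] at h; simp at h
          | some p =>
            rw [hp] at h
            obtain ⟨c1, r1⟩ := p
            dsimp only at h
            match f, hp with
            | 0, hp => simp [omgA_parse] at hp
            | g + 1, hp =>
              rw [omgA_parse] at hp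
              cases hl : omgA_loop g [t] rest with
              | none => rw [hl] at hp; simp at hp
              | some q =>
                rw [hl] at hp
                obtain ⟨c0, r1'⟩ := q
                simp only [Option.some.injEq, Prod.mk.injEq] at hp
                obtain ⟨hc1, hr1⟩ := hp
                subst hr1
                have e1 : omgB_loop (chunk :: stack) (t :: rest) = omgB_loop (["{"] :: chunk :: stack) rest := by
                  subst h2; simp [omgB_loop]
                have e2 := ih g (by omega) _ _ _ _ hl (chunk :: stack)
                dsimp only at e2
                rw [hc1] at e2
                have e3 := ih (g + 1) (by omega) _ _ _ _ h stack
                subst h2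
                rw [e1, e2, e3]
        · rw [if_neg h2] at h
          have e1 : omgB_loop (chunk :: stack) (t :: rest) = omgB_loop ((chunk ++ [t]) :: stack) rest := by
            simp [omgB_loop, h1, h2]
          rw [e1]
          exact ih f (by omega) _ _ _ _ h stack

-- discrete intermediate value: prefix balances move by at most 1 per token
theorem pvBal_ivt : ∀ (ts : List String) (m : Nat),
    pvBal (ts.take m) ≤ -2 → ∃ m' < m, pvBal (ts.take m') = -1 := by
  intro ts m
  induction m with
  | zero => simp [pvBal]
  | succ m ih =>
    intro h
    by_cases hm : pvBal (ts.take m) ≤ -2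
    · obtain ⟨m', hlt, he⟩ := ih hm; exact ⟨m', by omega, he⟩
    · have hstep : pvBal (ts.take (m+1)) = pvBal (ts.take m) + pvBal ((ts[m]?).toList) := by
        rw [List.take_add_one, pvBal_append]
      have hge : -1 ≤ pvBal ((ts[m]?).toList) := by
        cases h' : ts[m]? with
        | none => simp [pvBal]
        | some t => simpa [pvBal] using pvW_ge t
      exact ⟨m, by omega, by omega⟩

-- with the Pre_-condition and fuel ≥ 2·|x|+1 the loop succeeds
theorem omgA_loop_total : ∀ (x : List String) (f : Nat) (chunk : List String),
    (∃ n ≤ x.length, pvBal (x.take n) = -1) → 2 * x.length + 1 ≤ f →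
    (omgA_loop f chunk x).isSome := by
  suffices main : ∀ (N : Nat) (x : List String), x.length ≤ N → ∀ (f : Nat) (chunk : List String),
      (∃ n ≤ x.length, pvBal (x.take n) = -1) → 2 * x.length + 1 ≤ f →
      (omgA_loop f chunk x).isSome by
    intro x f chunk hc hf
    exact main x.length x le_rfl f chunk hc hf
  intro N
  induction N with
  | zero =>
    intro x hx f chunk hc hf
    have hxe : x = [] := List.eq_nil_of_length_eq_zero (by omega)
    subst hxe
    obtain ⟨n, hn, hb⟩ := hc
    simp [pvBal] at hb
  | succ N ihN =>
    intro x hx f chunk hc hf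
    obtain ⟨n, hn, hb⟩ := hc
    cases x with
    | nil => simp [pvBal] at hb
    | cons t rest =>
      simp only [List.length_cons] at hx hn hf
      obtain ⟨f', rfl⟩ : ∃ f', f = f' + 1 := ⟨f - 1, by omega⟩
      rw [omgA_loop]
      by_cases h1 : t = "}"
      · rw [if_pos h1]; simp
      · rw [if_neg h1]
        cases n with
        | zero => simp [pvBal] at hb
        | succ k =>
          simp only [List.take_succ_cons, pvBal] at hb
          by_cases h2 : t = "{"
          · rw [if_pos h2]
            have hW : pvW t = 1 := by simp [pvW, h2]
            obtain ⟨m, hm, hbm⟩ := pvBal_ivt rest k (by omega)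
            obtain ⟨g, rfl⟩ : ∃ g, f' = g + 1 := ⟨f' - 1, by omega⟩
            have hinner : (omgA_loop g [t] rest).isSome :=
              ihN rest (by omega) g [t] ⟨m, by omega, hbm⟩ (by omega)
            obtain ⟨⟨c0, r1⟩, hl⟩ := Option.isSome_iff_exists.mp hinner
            have hparse : omgA_parse (g + 1) (t :: rest) = some (pvRed c0, r1) := by
              rw [omgA_parse, hl]
            rw [hparse]
            dsimp only
            obtain ⟨w0, hw0ne, hrest, hw0bal, hw0pre⟩ := omgA_loop_sound g [t] rest c0 r1 hl
            subst hrest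
            simp only [List.length_append] at hn hx hf
            rw [pvBal_take_append] at hb
            have hkgt : w0.length < k := by
              by_contra hkle
              have hz : r1.take (k - w0.length) = [] := by
                have : k - w0.length = 0 := by omega
                rw [this, List.take_zero]
              rw [hz] at hb
              have : -1 ≤ pvBal (w0.take k) := by
                rcases Nat.lt_or_ge k w0.length with hk2 | hk2
                · have := hw0pre k hk2; omega
                · rw [List.take_of_length_le hk2, hw0bal]
              simp [pvBal] at hb
              omega
            have hco : pvBal (r1.take (k - w0.length)) = -1 := by
              rw [List.take_of_length_le (by omega), hw0bal] at hb
              omega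
            exact ihN r1 (by omega) (g + 1) (chunk ++ pvRed c0)
              ⟨k - w0.length, by omega, hco⟩ (by omega)
          · rw [if_neg h2]
            have hW : pvW t = 0 := by simp [pvW, h1, h2]
            exact ihN rest (by omega) f' (chunk ++ [t]) ⟨k, by omega, by omega⟩ (by omega)

-- ===== VERDICT (by name: the statement is the Claim_ definition above) =====
theorem omgParsing_spec : Claim_equal_omgParsing := by
  intro x hdom hpre
  unfold Spec_omgParsing
  obtain ⟨hne, hex⟩ := hpre
  cases x with
  | nil => exact absurd rfl hne
  | cons t0 rest =>
    simp only [List.tail_cons] at hex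
    obtain ⟨n, hnr, hb⟩ := hex
    have hn : n ≤ rest.length := by
      have := List.mem_range.mp hnr
      omega
    have htot : (omgA_loop (2 * (t0 :: rest).length + 1) [t0] rest).isSome :=
      omgA_loop_total rest _ [t0] ⟨n, hn, hb⟩ (by simp only [List.length_cons]; omega)
    obtain ⟨⟨c0, r⟩, hl⟩ := Option.isSome_iff_exists.mp htot
    have hparse : omgA_parse (2 * (t0 :: rest).length + 2) (t0 :: rest) = some (pvRed c0, r) := by
      have hfe : 2 * (t0 :: rest).length + 2 = (2 * (t0 :: rest).length + 1) + 1 := rfl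
      rw [hfe, omgA_parse, hl]
    have halt := omgA_loop_alt _ _ _ _ _ hl ([] : List (List String))
    dsimp only at halt
    unfold omgParsing omgParsing_alt
    rw [hparse]
    dsimp only
    rw [halt]
    rfl
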